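-- pv_equiv track=rewrite | github.com/EssamWisam/MLPath | mlpath/mlquest/mlquest.py | get_path_mask
-- ===== SOURCE A (Python) =====
-- def get_path_mask(json_obj):
--    '''
--    Given a json_obj return a mask_obj of the same structure (two level dictionary of keys and subkeys
--    and where values are lists) this returns a mask of the same shape as the json_obj but where if a value
--    is different from the previous row then it is a 1, otherwise it is a 0.
--    '''
--    # make mask obj of the same structure as json_obj
--    mask_obj = {}
--    for key in json_obj.keys():
--       mask_obj[key] = {}
--       for subkey in json_obj[key].keys():
--          mask_obj[key][subkey] = []
--
--    num_rows = len(json_obj['info']['id'])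
--    for i in range(num_rows):
--       for key in json_obj.keys():
--          for subkey in json_obj[key].keys():
--             value = json_obj[key][subkey][i]
--             if key != 'info':
--                if i != 0:
--                   if value != json_obj[key][subkey][i-1]:
--                      mask_obj[key][subkey].append(1)
--                   else :
--                      mask_obj[key][subkey].append(0)
--                else:
--                   mask_obj[key][subkey].append(0)
--             else:
--                mask_obj[key][subkey].append(0)
--    return mask_obj
-- ===== SOURCE B (Python) =====
-- def get_path_mask(json_obj):
--     '''Same mask via run-length encoding: each column is compressed into runs of equal
--     consecutive values, then decoded into a boundary mask (1 at the start of every run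
--     except the first, 0 elsewhere).'''
--     num_rows = len(json_obj['info']['id'])
--     mask_obj = {}
--     for key, sub in json_obj.items():
--         mask_obj[key] = {}
--         for subkey, col in sub.items():
--             if key == 'info':
--                 mask_obj[key][subkey] = [0] * num_rows
--                 continue
--             # run-length encode the first num_rows entries of the column
--             runs = []
--             for i in range(num_rows):
--                 v = col[i]
--                 if runs and runs[-1][0] == v:
--                     runs[-1][1] += 1
--                 else:
--                     runs.append([v, 1])
--             # decode: a run of length L contributes [1] + [0]*(L-1) (first run: all 0s)
--             mask = []
--             for j, (_, length) in enumerate(runs):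
--                 mask.append(0 if j == 0 else 1)
--                 mask.extend([0] * (length - 1))
--             mask_obj[key][subkey] = mask
--     return mask_obj
-- ===== Notes on version B (the rewrite author's own statement) =====
-- stated objective: alternative
-- what changed: A fills a pre-built mask dict cell-by-cell inside an outer row loop that re-walks every key/subkey per row; B has no row loop: it run-length encodes each column (runs of equal consecutive values) and decodes each run into [1]+[0]*(L-1) (first run all zeros), assembling the mask per column.
-- outside the precondition, e.g. on get_path_mask({}): A raises KeyError, B raises KeyError
import Mathlib
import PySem

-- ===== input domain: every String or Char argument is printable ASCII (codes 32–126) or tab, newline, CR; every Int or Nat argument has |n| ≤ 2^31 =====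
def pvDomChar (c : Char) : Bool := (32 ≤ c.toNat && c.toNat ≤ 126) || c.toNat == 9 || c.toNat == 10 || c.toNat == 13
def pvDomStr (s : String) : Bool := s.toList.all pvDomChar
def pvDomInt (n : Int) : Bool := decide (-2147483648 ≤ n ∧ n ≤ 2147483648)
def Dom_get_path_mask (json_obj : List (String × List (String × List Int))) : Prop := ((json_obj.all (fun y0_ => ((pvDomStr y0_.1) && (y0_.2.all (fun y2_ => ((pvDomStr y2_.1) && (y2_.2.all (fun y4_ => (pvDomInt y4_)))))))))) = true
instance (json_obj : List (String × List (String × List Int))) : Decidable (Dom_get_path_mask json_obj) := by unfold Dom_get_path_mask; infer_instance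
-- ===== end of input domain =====

-- B builds the mask by run-length encoding each column and decoding every run into
-- [1]+[0]*(L-1) (first run all zeros), instead of A's outer row loop filling a pre-built
-- mutable dict cell by cell; same asymptotic cost ("alternative", not faster).


-- ===== PORT A =====
-- num_rows = len(json_obj['info']['id']); Pre_ guarantees both lookups succeed (KeyError otherwise)
def pvNumRows (json_obj : List (String × List (String × List Int))) : Int :=
  ((PySem.Dict.mk ((PySem.Dict.mk json_obj).getD "info" [])).getD "id" []).length

-- the value appended for cell (key, its column col) at row i in A's innermost branch
def pvBit (key : String) (col : List Int) (i : Int) : Int :=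
  let value := (PySem.List.pyGet? col i).getD 0   -- Pre_ guarantees in range (IndexError otherwise)
  if key ≠ "info" then
    if i ≠ 0 then
      if value ≠ (PySem.List.pyGet? col (i - 1)).getD 0 then 1 else 0
    else 0
  else 0

-- mask_obj[key][subkey].append(v)
def pvAppendAt (m : List (String × List (String × List Int))) (k s : String) (v : Int) :
    List (String × List (String × List Int)) :=
  m.map (fun kv =>
    if kv.1 = k then (kv.1, kv.2.map (fun sv => if sv.1 = s then (sv.1, sv.2 ++ [v]) else sv))
    else kv)

def get_path_mask (json_obj : List (String × List (String × List Int))) :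
    List (String × List (String × List Int)) :=
  let mask0 := json_obj.map (fun kv => (kv.1, kv.2.map (fun sv => (sv.1, ([] : List Int)))))
  let num_rows := pvNumRows json_obj
  (PySem.List.pyRange 0 num_rows 1).foldl (fun mask i =>
    json_obj.foldl (fun mask kv =>
      kv.2.foldl (fun mask sv =>
        pvAppendAt mask kv.1 sv.1 (pvBit kv.1 sv.2 i)) mask) mask) mask0

-- ===== PORT B =====
-- 'if runs and runs[-1][0] == v: runs[-1][1] += 1 else: runs.append([v, 1])'
def pvRunStep (runs : List (Int × Int)) (v : Int) : List (Int × Int) :=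
  match runs.getLast? with
  | some last => if last.1 = v then runs.dropLast ++ [(last.1, last.2 + 1)] else runs ++ [(v, 1)]
  | none => [(v, 1)]

-- 'for i in range(num_rows): v = col[i]; …'  (run-length encode the first num_rows entries)
def pvRuns (col : List Int) (num_rows : Int) : List (Int × Int) :=
  (PySem.List.pyRange 0 num_rows 1).foldl
    (fun runs i => pvRunStep runs ((PySem.List.pyGet? col i).getD 0)) []

-- 'for j, (_, length) in enumerate(runs): mask.append(0 if j == 0 else 1); mask.extend([0]*(length-1))'
def pvDecode (runs : List (Int × Int)) : List Int :=
  (PySem.List.enumerate runs).foldl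
    (fun mask p => (mask ++ [if p.1 = 0 then (0 : Int) else 1]) ++ List.replicate (p.2.2 - 1).toNat 0) []

def get_path_mask_alt (json_obj : List (String × List (String × List Int))) :
    List (String × List (String × List Int)) :=
  let num_rows := pvNumRows json_obj
  json_obj.foldl (fun mask_obj kv =>
    mask_obj ++ [(kv.1, kv.2.foldl (fun sub sv =>
      sub ++ [(sv.1,
        if kv.1 = "info" then List.replicate num_rows.toNat 0
        else pvDecode (pvRuns sv.2 num_rows))]) [])]) []

-- ===== PRECONDITION & SPEC =====
-- Pre_ excludes exactly: inputs where A raises (missing 'info' key or 'id' subkey → KeyError;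
-- some column shorter than len(json_obj['info']['id']) → IndexError), and duplicate top-level
-- keys or duplicate subkeys within a key, which cannot occur in a Python dict argument.
def Pre_get_path_mask (json_obj : List (String × List (String × List Int))) : Prop :=
  (json_obj.map Prod.fst).Nodup ∧
  (∀ kv ∈ json_obj, (kv.2.map Prod.fst).Nodup) ∧
  ((PySem.Dict.mk json_obj).get? "info").isSome = true ∧
  ((PySem.Dict.mk ((PySem.Dict.mk json_obj).getD "info" [])).get? "id").isSome = true ∧
  (∀ kv ∈ json_obj, ∀ sv ∈ kv.2, pvNumRows json_obj ≤ sv.2.length)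
instance (json_obj : List (String × List (String × List Int))) : Decidable (Pre_get_path_mask json_obj) := by unfold Pre_get_path_mask; infer_instance

def pvWitness_get_path_mask : (List (String × List (String × List Int))) :=
  [("info", [("id", [1, 2])]), ("x", [("a", [5, 5])])]

def Spec_get_path_mask (json_obj : List (String × List (String × List Int))) (out : List (String × List (String × List Int))) : Prop := out = get_path_mask_alt json_obj
instance (json_obj : List (String × List (String × List Int))) (out : List (String × List (String × List Int))) : Decidable (Spec_get_path_mask json_obj out) := by unfold Spec_get_path_mask; infer_instance

-- ===== CLAIM (what is proved, stated in full; the proofs are below) =====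
def Claim_equal_get_path_mask : Prop := ∀ (json_obj : List (String × List (String × List Int))), Dom_get_path_mask json_obj → Pre_get_path_mask json_obj → Spec_get_path_mask json_obj (get_path_mask json_obj)

-- ===== LEMMAS AND PROOFS =====

-- the common shape: json_obj with every cell (kv, sv) replaced by G kv sv
def pvShape (J : List (String × List (String × List Int)))
    (G : (String × List (String × List Int)) → (String × List Int) → List Int) :
    List (String × List (String × List Int)) :=
  J.map (fun kv => (kv.1, kv.2.map (fun sv => (sv.1, G kv sv))))

theorem pvShape_congr {J : List (String × List (String × List Int))} {G₁ G₂}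
    (h : ∀ kv ∈ J, ∀ sv ∈ kv.2, G₁ kv sv = G₂ kv sv) : pvShape J G₁ = pvShape J G₂ := by
  unfold pvShape
  exact List.map_congr_left (fun kv hkv => by
    simp only [Prod.mk.injEq, true_and]
    exact List.map_congr_left (fun sv hsv => by rw [h kv hkv sv hsv]))

theorem pvAppendAt_shape (J : List (String × List (String × List Int))) (G) (k s : String) (v : Int) :
    pvAppendAt (pvShape J G) k s v
      = pvShape J (fun kv sv => if kv.1 = k ∧ sv.1 = s then G kv sv ++ [v] else G kv sv) := by
  unfold pvAppendAt pvShape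
  rw [List.map_map]
  refine List.map_congr_left (fun kv _ => ?_)
  by_cases hk : kv.1 = k
  · simp only [Function.comp_apply, hk, if_true, List.map_map, Prod.mk.injEq, true_and]
    refine List.map_congr_left (fun sv _ => ?_)
    by_cases hs : sv.1 = s <;> simp [hs]
  · simp [Function.comp, hk]

def pvFlat (J : List (String × List (String × List Int))) : List (String × String × List Int) :=
  J.flatMap (fun kv => kv.2.map (fun sv => (kv.1, sv)))

-- the interleaved double fold of row i is the fold over the flattened cell list
theorem pvStep_flat (J : List (String × List (String × List Int))) (i : Int)
    (m : List (String × List (String × List Int))) :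
    J.foldl (fun mask kv =>
      kv.2.foldl (fun mask sv => pvAppendAt mask kv.1 sv.1 (pvBit kv.1 sv.2 i)) mask) m
    = (pvFlat J).foldl (fun mask p => pvAppendAt mask p.1 p.2.1 (pvBit p.1 p.2.2 i)) m := by
  induction J generalizing m with
  | nil => rfl
  | cons kv t ih =>
    simp only [List.foldl_cons, pvFlat, List.flatMap_cons, List.foldl_append, List.foldl_map]
    exact ih _

theorem pvFold_flat_shape (i : Int) (J : List (String × List (String × List Int)))
    (P : List (String × String × List Int)) (G) :
    P.foldl (fun mask p => pvAppendAt mask p.1 p.2.1 (pvBit p.1 p.2.2 i)) (pvShape J G)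
      = pvShape J (fun kv sv =>
          G kv sv ++ (P.filter (fun p => decide (p.1 = kv.1 ∧ p.2.1 = sv.1))).map
            (fun p => pvBit p.1 p.2.2 i)) := by
  induction P generalizing G with
  | nil => exact (pvShape_congr (fun kv _ sv _ => by simp)).symm
  | cons p t ih =>
    simp only [List.foldl_cons, pvAppendAt_shape, ih]
    refine pvShape_congr (fun kv _ sv _ => ?_)
    by_cases h : p.1 = kv.1 ∧ p.2.1 = sv.1
    · simp only [List.filter_cons, decide_eq_true (And.intro h.1 h.2)]
      simp [List.append_assoc, h]
    · have h' : ¬ (kv.1 = p.1 ∧ sv.1 = p.2.1) := fun hc => h ⟨hc.1.symm, hc.2.symm⟩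
      simp only [List.filter_cons]
      simp [h, h']

theorem pvFilter_fst (l : List (String × List Int)) (sv : String × List Int)
    (hnd : (l.map Prod.fst).Nodup) (hmem : sv ∈ l) :
    l.filter (fun sv' => decide (sv'.1 = sv.1)) = [sv] := by
  induction l with
  | nil => cases hmem
  | cons a t ih =>
    simp only [List.map_cons, List.nodup_cons] at hnd
    rcases List.mem_cons.mp hmem with rfl | hm
    · have : t.filter (fun sv' => decide (sv'.1 = sv.1)) = [] := by
        refine List.filter_eq_nil_iff.mpr (fun b hb => ?_)
        simp only [decide_eq_true_eq]
        exact fun hc => hnd.1 (hc ▸ List.mem_map_of_mem hb)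
      simp [this]
    · have ha : ¬ a.1 = sv.1 := fun hc => hnd.1 (by rw [hc]; exact List.mem_map_of_mem hm)
      simp [ha, ih hnd.2 hm]

theorem pvFilter_flat (J : List (String × List (String × List Int)))
    (hnd : (J.map Prod.fst).Nodup) (hnd2 : ∀ kv ∈ J, (kv.2.map Prod.fst).Nodup)
    (kv : String × List (String × List Int)) (hkv : kv ∈ J) (sv : String × List Int)
    (hsv : sv ∈ kv.2) :
    (pvFlat J).filter (fun p => decide (p.1 = kv.1 ∧ p.2.1 = sv.1)) = [(kv.1, sv)] := by
  induction J with
  | nil => cases hkv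
  | cons a t ih =>
    simp only [List.map_cons, List.nodup_cons] at hnd
    simp only [pvFlat, List.flatMap_cons, List.filter_append, List.filter_map]
    rcases List.mem_cons.mp hkv with rfl | hm
    · have ht : (t.flatMap (fun kv' => kv'.2.map (fun sv' => (kv'.1, sv')))).filter
          (fun p => decide (p.1 = kv.1 ∧ p.2.1 = sv.1)) = [] := by
        refine List.filter_eq_nil_iff.mpr (fun b hb => ?_)
        simp only [List.mem_flatMap, List.mem_map] at hb
        obtain ⟨kv', hkv', sv', _, rfl⟩ := hb
        simp only [decide_eq_true_eq, not_and]
        exact fun hc _ => hnd.1 (hc ▸ List.mem_map_of_mem hkv')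
      have hf : kv.2.filter ((fun p => decide (p.1 = kv.1 ∧ p.2.1 = sv.1)) ∘
          (fun sv' => (kv.1, sv'))) = [sv] := by
        have := pvFilter_fst kv.2 sv (hnd2 kv hkv) hsv
        rw [← this]
        exact List.filter_congr (fun x _ => by simp)
      rw [ht, hf]
      simp
    · have ha : (a.2.filter ((fun p => decide (p.1 = kv.1 ∧ p.2.1 = sv.1)) ∘
          (fun sv' => (a.1, sv')))) = [] := by
        refine List.filter_eq_nil_iff.mpr (fun b _ => ?_)
        simp only [Function.comp, decide_eq_true_eq, not_and]
        exact fun hc _ => hnd.1 (hc.symm ▸ List.mem_map_of_mem hm)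
      rw [ha]
      simpa [pvFlat] using ih hnd.2 (fun kv' h => hnd2 kv' (List.mem_cons_of_mem a h)) hm

-- the whole row loop, for an arbitrary list of row indices
theorem pvRows (J : List (String × List (String × List Int)))
    (hnd : (J.map Prod.fst).Nodup) (hnd2 : ∀ kv ∈ J, (kv.2.map Prod.fst).Nodup)
    (is : List Int) (G) :
    is.foldl (fun mask i =>
        J.foldl (fun mask kv =>
          kv.2.foldl (fun mask sv => pvAppendAt mask kv.1 sv.1 (pvBit kv.1 sv.2 i)) mask) mask)
      (pvShape J G)
    = pvShape J (fun kv sv => G kv sv ++ is.map (fun i => pvBit kv.1 sv.2 i)) := by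
  induction is generalizing G with
  | nil => exact (pvShape_congr (fun kv _ sv _ => by simp)).symm
  | cons i t ih =>
    have hstep : J.foldl (fun mask kv =>
        kv.2.foldl (fun mask sv => pvAppendAt mask kv.1 sv.1 (pvBit kv.1 sv.2 i)) mask)
        (pvShape J G) = pvShape J (fun kv sv => G kv sv ++ [pvBit kv.1 sv.2 i]) := by
      rw [pvStep_flat, pvFold_flat_shape]
      exact pvShape_congr (fun kv hkv sv hsv => by
        rw [pvFilter_flat J hnd hnd2 kv hkv sv hsv]; rfl)
    rw [List.foldl_cons, hstep, ih]
    exact pvShape_congr (fun kv _ sv _ => by simp)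

-- B's nested append folds are the same shape-map
theorem pvAlt_shape (J : List (String × List (String × List Int))) (n : Int) :
    J.foldl (fun mask_obj kv =>
      mask_obj ++ [(kv.1, kv.2.foldl (fun sub sv =>
        sub ++ [(sv.1,
          if kv.1 = "info" then List.replicate n.toNat 0
          else pvDecode (pvRuns sv.2 n))]) [])]) []
    = pvShape J (fun kv sv =>
        if kv.1 = "info" then List.replicate n.toNat 0 else pvDecode (pvRuns sv.2 n)) := by
  rw [PySem.List.foldl_append_singleton_eq_map]
  refine List.nil_append _ ▸ List.map_congr_left (fun kv _ => ?_)
  rw [PySem.List.foldl_append_singleton_eq_map]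
  simp

-- pvDecode as a flatMap over the enumerated runs
theorem pvDecode_flatMap (rs : List (Int × Int)) :
    pvDecode rs = (PySem.List.enumerate rs).flatMap
      (fun p => (if p.1 = 0 then [(0 : Int)] else [1]) ++ List.replicate (p.2.2 - 1).toNat 0) := by
  unfold pvDecode
  have hb : (fun (mask : List Int) (p : Int × Int × Int) =>
      (mask ++ [if p.1 = 0 then (0 : Int) else 1]) ++ List.replicate (p.2.2 - 1).toNat 0)
      = fun mask p => mask ++ ((if p.1 = 0 then [(0 : Int)] else [1]) ++ List.replicate (p.2.2 - 1).toNat 0) := by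
    funext mask p
    by_cases h : p.1 = 0 <;> simp [h]
  rw [hb, PySem.List.foldl_append_eq_flatMap, List.nil_append]

theorem pvDecode_snoc (rs : List (Int × Int)) (r : Int × Int) :
    pvDecode (rs ++ [r])
      = pvDecode rs ++ ((if rs = [] then [(0 : Int)] else [1]) ++ List.replicate (r.2 - 1).toNat 0) := by
  rw [pvDecode_flatMap, pvDecode_flatMap, PySem.List.enumerate_append, List.flatMap_append]
  congr 1
  simp only [PySem.List.enumerate, List.flatMap_cons, List.flatMap_nil, List.append_nil]
  by_cases h : rs = []
  · simp [h]
  · have : ¬ ((0 : Int) + rs.length = 0) := by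
      have : rs.length ≠ 0 := fun hc => h (List.length_eq_zero_iff.mp hc)
      omega
    simp [h]

-- reduction forms of pvRunStep
theorem pvRunStep_nil (v : Int) : pvRunStep [] v = [(v, 1)] := rfl

theorem pvRunStep_concat (ys : List (Int × Int)) (l : Int × Int) (v : Int) :
    pvRunStep (ys ++ [l]) v
      = if l.1 = v then ys ++ [(l.1, l.2 + 1)] else (ys ++ [l]) ++ [(v, 1)] := by
  unfold pvRunStep
  rw [List.getLast?_concat]
  by_cases hv : l.1 = v <;> simp [hv]

theorem pvDecode_nil : pvDecode [] = [] := rfl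

theorem pvDecode_single (v : Int) : pvDecode [(v, 1)] = [0] := rfl

-- incrementing the last run's count appends one 0; a fresh run appends its boundary bit
theorem pvDecode_runStep_concat (ys : List (Int × Int)) (l : Int × Int) (v : Int)
    (hl1 : 1 ≤ l.2) :
    pvDecode (pvRunStep (ys ++ [l]) v)
      = pvDecode (ys ++ [l]) ++ [if l.1 = v then 0 else 1] := by
  rw [pvRunStep_concat]
  by_cases hv : l.1 = v
  · rw [if_pos hv, if_pos hv, pvDecode_snoc, pvDecode_snoc]
    have hrep : List.replicate (l.2 + 1 - 1).toNat (0 : Int)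
        = List.replicate (l.2 - 1).toNat 0 ++ [0] := by
      have h1 : (l.2 + 1 - 1).toNat = (l.2 - 1).toNat + 1 := by omega
      rw [h1, List.replicate_succ']
    rw [hrep]
    simp [List.append_assoc]
  · rw [if_neg hv, if_neg hv, pvDecode_snoc]
    simp

-- pvRunStep keeps the run list nonempty, all counts ≥ 1, and its last run carries v
theorem pvRunStep_props (rs : List (Int × Int)) (v : Int) (hpos : ∀ r ∈ rs, 1 ≤ r.2) :
    pvRunStep rs v ≠ [] ∧ (∀ r ∈ pvRunStep rs v, 1 ≤ r.2) ∧
    (∃ c, (pvRunStep rs v).getLast? = some (v, c)) := by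
  rcases List.eq_nil_or_concat rs with rfl | ⟨ys, l, rfl⟩
  · exact ⟨by simp [pvRunStep_nil], by simp [pvRunStep_nil], ⟨1, by simp [pvRunStep_nil]⟩⟩
  · simp only [List.concat_eq_append] at hpos ⊢
    have hl1 : 1 ≤ l.2 := hpos l (by simp)
    rw [pvRunStep_concat]
    by_cases hv : l.1 = v
    · rw [if_pos hv]
      refine ⟨by simp, ?_, ⟨l.2 + 1, by rw [List.getLast?_concat, hv]⟩⟩
      intro r hr
      rcases List.mem_append.mp hr with h1 | h2
      · exact hpos r (List.mem_append_left _ h1)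
      · simp at h2
        subst h2
        simp
        omega
    · rw [if_neg hv]
      refine ⟨by simp, ?_, ⟨1, List.getLast?_concat⟩⟩
      intro r hr
      rcases List.mem_append.mp hr with h1 | h2
      · exact hpos r h1
      · simp at h2
        subst h2
        norm_num

-- the ColInv bundle: A's per-row bits over range(m) decode B's runs, plus run invariants
theorem pvColInv (col : List Int) (m : Nat) (hm : m ≤ col.length) :
    ((PySem.List.pyRange 0 (m : Nat) 1).map (fun i =>
        if i ≠ (0 : Int) then
          (if (PySem.List.pyGet? col i).getD 0 ≠ (PySem.List.pyGet? col (i - 1)).getD 0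
           then (1 : Int) else 0)
        else 0)
      = pvDecode (pvRuns col (m : Nat)))
    ∧ (pvRuns col (m : Nat) = [] ↔ m = 0)
    ∧ (∀ r ∈ pvRuns col (m : Nat), 1 ≤ r.2)
    ∧ (∀ _ : 0 < m, ∃ c, (pvRuns col (m : Nat)).getLast? = some (col.getD (m - 1) 0, c)) := by
  induction m with
  | zero =>
    have h00 : PySem.List.pyRange 0 (0 : Int) 1 = [] :=
      PySem.List.pyRange_one_eq_nil (by norm_num)
    have hr0 : pvRuns col (0 : Int) = [] := by
      unfold pvRuns
      rw [h00]
      rfl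
    refine ⟨by simp [h00, hr0, pvDecode_nil], by simp [hr0], by simp [hr0],
      fun h => absurd h (by omega)⟩
  | succ m ih =>
    have hm' : m ≤ col.length := Nat.le_of_succ_le hm
    obtain ⟨ihmap, ihnil, ihpos, ihlast⟩ := ih hm'
    have hsnoc : PySem.List.pyRange 0 ((m + 1 : Nat) : Int) 1
        = PySem.List.pyRange 0 (m : Int) 1 ++ [(m : Int)] := by
      push_cast
      exact PySem.List.pyRange_one_succ_right (by positivity)
    have hv : (PySem.List.pyGet? col ((m : Nat) : Int)).getD 0 = col.getD m 0 := by
      simp [PySem.List.pyGet?_natCast, List.getD]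
    have hruns : pvRuns col ((m + 1 : Nat) : Int)
        = pvRunStep (pvRuns col (m : Int)) (col.getD m 0) := by
      unfold pvRuns
      rw [hsnoc, List.foldl_append]
      simp
    obtain ⟨hne, hpos', c', hlast'⟩ := pvRunStep_props (pvRuns col (m : Int)) (col.getD m 0) ihpos
    refine ⟨?_, ⟨fun h => absurd h (hruns ▸ hne), fun h => by omega⟩,
      by rw [hruns]; exact hpos', fun _ => ⟨c', by rw [hruns]; simpa using hlast'⟩⟩
    rw [hsnoc, List.map_append, hruns]
    by_cases hm0 : m = 0
    · subst hm0
      have h00 : PySem.List.pyRange 0 (0 : Int) 1 = [] :=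
        PySem.List.pyRange_one_eq_nil (by norm_num)
      have hr0 : pvRuns col (0 : Int) = [] := by
        unfold pvRuns
        rw [h00]
        rfl
      simp [h00, hr0, pvRunStep_nil, pvDecode_single]
    · have hpos0 : 0 < m := Nat.pos_of_ne_zero hm0
      obtain ⟨c, hc⟩ := ihlast hpos0
      obtain ⟨ys, hys⟩ := List.getLast?_eq_some_iff.mp hc
      have hcpos : 1 ≤ c := by
        have := ihpos (col.getD (m - 1) 0, c) (by rw [hys]; simp)
        simpa using this
      rw [hys, pvDecode_runStep_concat ys _ _ hcpos, ← hys, ihmap]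
      congr 1
      have hm1 : ((m : Nat) : Int) ≠ 0 := Int.natCast_ne_zero.mpr hm0
      have hsub : ((m : Nat) : Int) - 1 = ((m - 1 : Nat) : Int) := by omega
      have hv' : (PySem.List.pyGet? col (((m : Nat) : Int) - 1)).getD 0 = col.getD (m - 1) 0 := by
        rw [hsub]
        simp [PySem.List.pyGet?_natCast, List.getD]
      by_cases h : col.getD (m - 1) 0 = col.getD m 0
      · simp only [List.getD_eq_getElem?_getD] at h
        simp [hv', hm0, h]
      · simp only [List.getD_eq_getElem?_getD] at h
        simp [hv', hm0, h, Ne.symm h]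


theorem pvCol_eq (J : List (String × List (String × List Int))) (k : String) (col : List Int)
    (hlen : pvNumRows J ≤ (col.length : Int)) :
    (PySem.List.pyRange 0 (pvNumRows J) 1).map (fun i => pvBit k col i)
      = if k = "info" then List.replicate (pvNumRows J).toNat 0
        else pvDecode (pvRuns col (pvNumRows J)) := by
  have h0 : 0 ≤ pvNumRows J := by
    unfold pvNumRows
    exact Int.natCast_nonneg _
  by_cases hk : k = "info"
  · rw [if_pos hk]
    have hz : ∀ i, pvBit k col i = 0 := fun i => by simp [pvBit, hk]
    rw [List.map_congr_left (fun i _ => hz i), List.map_const', PySem.List.length_pyRange_one]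
    norm_num
  · rw [if_neg hk]
    have hmn : (((pvNumRows J).toNat : Nat) : Int) = pvNumRows J := Int.toNat_of_nonneg h0
    have hm : (pvNumRows J).toNat ≤ col.length := by omega
    obtain ⟨hmain, -, -, -⟩ := pvColInv col (pvNumRows J).toNat hm
    rw [hmn] at hmain
    rw [← hmain]
    exact List.map_congr_left (fun i _ => by simp [pvBit, hk])

-- ===== VERDICT (by name: the statement is the Claim_ definition above) =====
theorem get_path_mask_spec : Claim_equal_get_path_mask := by
  intro J _ hpre
  obtain ⟨hnd, hnd2, -, -, hlen⟩ := hpre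
  unfold Spec_get_path_mask get_path_mask get_path_mask_alt
  rw [pvAlt_shape]
  have h0 : J.map (fun kv => (kv.1, kv.2.map (fun sv => (sv.1, ([] : List Int)))))
      = pvShape J (fun _ _ => []) := rfl
  rw [h0, pvRows J hnd hnd2]
  refine pvShape_congr (fun kv hkv sv hsv => ?_)
  rw [List.nil_append, pvCol_eq J kv.1 sv.2 (hlen kv hkv sv hsv)]
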